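-- pv_equiv track=rewrite | github.com/nobodyknowsthat/soda | myssd_sdk/scripts/prof_analyzer.py | get_sample_locs
-- ===== SOURCE A (Python) =====
-- def get_sample_locs(samples, symbols):
--     locs = dict()
--
--     for s in samples:
--         pc = s
--
--         for (s, symbol), (e, _) in zip(symbols[:-1], symbols[1:]):
--             if s <= pc < e:
--                 loc = symbol
--                 break
--         else:
--             loc = symbols[-1][1]
--
--         if locs.get(loc) is None:
--             locs[loc] = 1
--         else:
--             locs[loc] += 1
--
--     return locs
-- ===== SOURCE B (Python) =====
-- def get_sample_locs(samples, symbols):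
--     # Group samples first (Counter-style), then resolve each DISTINCT pc once.
--     locs = {}
--     counts = {}
--     for s in samples:
--         counts[s] = counts.get(s, 0) + 1
--     if counts:
--         intervals = [(a, e, name) for (a, name), (e, _) in zip(symbols, symbols[1:])]
--         fallback = symbols[-1][1]
--         for pc, c in counts.items():
--             loc = next((name for (a, e, name) in intervals if a <= pc < e), fallback)
--             locs[loc] = locs.get(loc, 0) + c
--     return locs
-- ===== Notes on version B (the rewrite author's own statement) =====
-- stated objective: faster
-- what changed: B first groups the samples into a value->multiplicity counter, then resolves each DISTINCT pc against a precomputed interval-triple list once and adds its multiplicity, instead of A's per-sample rebuild-and-rescan of zip(symbols[:-1], symbols[1:]); O(u*m + n) with u distinct samples vs A's O(n*m), and the zip/slice lists are built once instead of per sample.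
import Mathlib
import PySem

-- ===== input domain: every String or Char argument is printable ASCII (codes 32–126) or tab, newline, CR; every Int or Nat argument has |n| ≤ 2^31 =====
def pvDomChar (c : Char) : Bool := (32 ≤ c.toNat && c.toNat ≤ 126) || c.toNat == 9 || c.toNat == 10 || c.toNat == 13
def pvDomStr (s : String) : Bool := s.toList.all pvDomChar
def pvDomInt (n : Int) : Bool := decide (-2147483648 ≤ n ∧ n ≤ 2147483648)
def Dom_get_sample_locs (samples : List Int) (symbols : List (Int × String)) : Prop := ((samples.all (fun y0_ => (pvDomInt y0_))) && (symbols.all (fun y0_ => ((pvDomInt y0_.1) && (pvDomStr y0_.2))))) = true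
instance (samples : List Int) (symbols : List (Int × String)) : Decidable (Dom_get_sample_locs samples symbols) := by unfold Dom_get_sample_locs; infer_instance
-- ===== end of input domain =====

-- B groups the samples into a counter and resolves each DISTINCT pc once against a
-- precomputed interval list (alternative algorithm); equal on Pre_ (outside Pre_,
-- i.e. samples ≠ [] with symbols = [], Python A raises IndexError).


-- ===== PORT A =====
-- A's inner 'for (s, symbol), (e, _) in zip(…): if s <= pc < e: loc = symbol; break / else'
def pvFindA (pc : Int) : List ((Int × String) × (Int × String)) → Option String
  | [] => none
  | ((a, symbol), (e, _)) :: rest =>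
      if a ≤ pc ∧ pc < e then some symbol else pvFindA pc rest

def get_sample_locs (samples : List Int) (symbols : List (Int × String)) : List (String × Int) :=
  (samples.foldl (fun (locs : PySem.Dict String Int) s =>
      let pc := s
      let loc := match pvFindA pc (List.zip (PySem.List.slice symbols none (some (-1)))
                                            (PySem.List.slice symbols (some 1) none)) with
        | some l => l
        | none => ((PySem.List.pyGet? symbols (-1)).getD (0, "")).2   -- symbols[-1][1]; none only outside Pre_
      match locs.get? loc with
      | none => locs.insert loc 1
      | some v => locs.insert loc (v + 1)) PySem.Dict.empty).items

-- ===== PORT B =====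
-- B's 'next((name for (a, e, name) in intervals if a <= pc < e), fallback)'
def pvFindB (pc : Int) : List (Int × Int × String) → Option String
  | [] => none
  | (a, e, name) :: rest =>
      if a ≤ pc ∧ pc < e then some name else pvFindB pc rest

def get_sample_locs_alt (samples : List Int) (symbols : List (Int × String)) : List (String × Int) :=
  let counts := samples.foldl (fun (d : PySem.Dict Int Int) s => d.insert s (d.getD s 0 + 1)) PySem.Dict.empty
  if counts.items = [] then []
  else
    let intervals := (List.zip symbols (PySem.List.slice symbols (some 1) none)).map
        (fun p => (p.1.1, p.2.1, p.1.2))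
    let fallback := ((PySem.List.pyGet? symbols (-1)).getD (0, "")).2   -- symbols[-1][1]; none only outside Pre_
    (counts.items.foldl (fun (locs : PySem.Dict String Int) pc_c =>
        locs.insert ((pvFindB pc_c.1 intervals).getD fallback)
          (locs.getD ((pvFindB pc_c.1 intervals).getD fallback) 0 + pc_c.2)) PySem.Dict.empty).items

-- ===== PRECONDITION & SPEC =====
-- Pre_ excludes exactly the inputs on which Python A raises IndexError:
-- samples ≠ [] together with symbols = [] (then symbols[-1] fails; B raises there too).
def Pre_get_sample_locs (samples : List Int) (symbols : List (Int × String)) : Prop :=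
  samples = [] ∨ symbols ≠ []
instance (samples : List Int) (symbols : List (Int × String)) : Decidable (Pre_get_sample_locs samples symbols) := by unfold Pre_get_sample_locs; infer_instance

def pvWitness_get_sample_locs : List Int × (List (Int × String)) := ([1, 5, 1], [(0, "a"), (4, "b")])

def Spec_get_sample_locs (samples : List Int) (symbols : List (Int × String)) (out : List (String × Int)) : Prop := out = get_sample_locs_alt samples symbols
instance (samples : List Int) (symbols : List (Int × String)) (out : List (String × Int)) : Decidable (Spec_get_sample_locs samples symbols out) := by unfold Spec_get_sample_locs; infer_instance

-- ===== CLAIM (what is proved, stated in full; the proofs are below) =====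
def Claim_equal_get_sample_locs : Prop := ∀ (samples : List Int) (symbols : List (Int × String)), Dom_get_sample_locs samples symbols → Pre_get_sample_locs samples symbols → Spec_get_sample_locs samples symbols (get_sample_locs samples symbols)

-- ===== LEMMAS AND PROOFS =====

-- the symbol a pc resolves to (shared characterisation of both inner lookups)
def pvKey (symbols : List (Int × String)) (pc : Int) : String :=
  (pvFindB pc ((List.zip symbols symbols.tail).map (fun p => (p.1.1, p.2.1, p.1.2)))).getD
    (((PySem.List.pyGet? symbols (-1)).getD (0, "")).2)

-- A's lookup over zip(symbols[:-1], symbols[1:]) equals B's over the reshaped triples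
theorem pvFind_eq (pc : Int) : ∀ xs : List (Int × String),
    pvFindA pc (List.zip xs.dropLast xs.tail)
      = pvFindB pc ((List.zip xs xs.tail).map (fun p => (p.1.1, p.2.1, p.1.2)))
  | [] => rfl
  | [_] => rfl
  | x :: y :: rest => by
      show pvFindA pc (List.zip (x :: List.dropLast (y :: rest)) (y :: rest)) = _
      simp only [List.zip_cons_cons, List.map_cons, pvFindA, pvFindB, List.tail_cons]
      split
      · rfl
      · exact pvFind_eq pc (y :: rest)

-- A's whole loop is Counter(map(pvKey symbols, samples))
theorem pvA_char (samples : List Int) (symbols : List (Int × String)) :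
    get_sample_locs samples symbols
      = (PySem.Dict.counter (samples.map (pvKey symbols))).items := by
  unfold get_sample_locs
  rw [← PySem.Dict.foldl_insert_getD_add_one_eq_counter, List.foldl_map]
  refine congrArg (fun d => PySem.Dict.items d) ?_
  apply PySem.List.foldl_congr_mem
  intro acc s _
  have hk : (match pvFindA s (List.zip (PySem.List.slice symbols none (some (-1)))
                                       (PySem.List.slice symbols (some 1) none)) with
      | some l => l
      | none => ((PySem.List.pyGet? symbols (-1)).getD (0, "")).2) = pvKey symbols s := by
    rw [PySem.List.slice_to_neg_one, PySem.List.slice_from_one, pvFind_eq]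
    unfold pvKey
    cases pvFindB s ((List.zip symbols symbols.tail).map (fun p => (p.1.1, p.2.1, p.1.2))) <;> rfl
  simp only [hk]
  cases hg : acc.get? (pvKey symbols s) with
  | none => simp [PySem.Dict.getD_of_get?_eq_none acc 0 hg]
  | some v => simp [PySem.Dict.getD_of_get?_eq_some acc 0 hg]

-- value of B's weighted counting loop
theorem pvB_getD (g : Int → String) (L : List (Int × Int)) (d : PySem.Dict String Int) (k : String) :
    (L.foldl (fun d p => d.insert (g p.1) (d.getD (g p.1) 0 + p.2)) d).getD k 0
      = d.getD k 0 + ((L.filter (fun p => g p.1 == k)).map (·.2)).sum := by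
  induction L generalizing d with
  | nil => simp
  | cons p t ih =>
      simp only [List.foldl_cons, ih, List.filter_cons]
      by_cases h : g p.1 = k
      · simp [h, PySem.Dict.getD_insert_self, add_assoc]
      · have h2 : ¬ (k = g p.1) := fun he => h he.symm
        have h3 : (g p.1 == k) = false := by simp [h]
        simp [h3, PySem.Dict.getD_insert, h2]

-- Set.ofList (l ++ [a]) grows by Set.add
theorem pvOfListSnoc {α : Type} [BEq α] (l : List α) (a : α) :
    PySem.Set.ofList (l ++ [a]) = PySem.Set.add (PySem.Set.ofList l) a := by
  simp [PySem.Set.ofList_eq_foldl, List.foldl_append]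

-- Set.update from the empty set is Set.ofList
theorem pvUpdateNil (l : List String) : PySem.Set.update [] l = PySem.Set.ofList l := by
  simp [PySem.Set.update, PySem.Set.ofList_eq_foldl]

-- dedup-then-map has the same first-occurrence set as map
theorem pvS1 (g : Int → String) (xs : List Int) :
    PySem.Set.ofList ((PySem.Set.ofList xs).map g) = PySem.Set.ofList (xs.map g) := by
  induction xs using List.reverseRecOn with
  | nil => rfl
  | append_singleton xs x ih =>
      rw [List.map_append, List.map_singleton, pvOfListSnoc, pvOfListSnoc]
      by_cases hx : x ∈ PySem.Set.ofList xs
      · have h1 : PySem.Set.add (PySem.Set.ofList xs) x = PySem.Set.ofList xs := by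
          simp [PySem.Set.add, PySem.Set.contains, hx]
        have hfx : g x ∈ PySem.Set.ofList (xs.map g) := by
          rw [PySem.Set.mem_ofList]
          exact List.mem_map_of_mem ((PySem.Set.mem_ofList ..).mp hx)
        rw [h1, ih]
        simp [PySem.Set.add, PySem.Set.contains, hfx]
      · have h1 : PySem.Set.add (PySem.Set.ofList xs) x = PySem.Set.ofList xs ++ [x] := by
          simp [PySem.Set.add, PySem.Set.contains, hx]
        rw [h1, List.map_append, List.map_singleton, pvOfListSnoc, ih]

-- summing per-value multiplicities over the distinct values is counting
theorem pvS2 (p : Int → Bool) (samples : List Int) :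
    (((PySem.Set.ofList samples).filter p).map (fun v => (samples.count v : Int))).sum
      = (samples.countP p : Int) := by
  have hperm : (PySem.Set.ofList samples).Perm samples.dedup := by
    apply List.perm_of_nodup_nodup_toFinset_eq (PySem.Set.nodup_ofList samples)
      (List.nodup_dedup samples)
    ext a; simp [PySem.Set.mem_ofList]
  rw [List.Perm.sum_eq ((hperm.filter p).map (fun v => (samples.count v : Int)))]
  rw [show (fun v => ((samples.count v : Nat) : Int))
      = ((fun n : Nat => (n : Int)) ∘ (fun v => samples.count v)) from rfl]
  rw [← List.map_map, ← Nat.cast_list_sum, List.sum_map_count_dedup_filter_eq_countP]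

theorem pvCountMap (l : List Int) (g : Int → String) (k : String) :
    (l.map g).count k = l.countP (fun a => g a == k) := by
  simp [List.count, List.countP_map]; rfl

-- B's loop over Counter(xs).items builds Counter(map(g, xs))
theorem pvB_char (g : Int → String) (xs : List Int) :
    ((PySem.Dict.counter xs).items.foldl
        (fun (locs : PySem.Dict String Int) pc_c =>
          locs.insert (g pc_c.1) (locs.getD (g pc_c.1) 0 + pc_c.2)) PySem.Dict.empty).items
      = (PySem.Dict.counter (xs.map g)).items := by
  have hkeys : ((PySem.Dict.counter xs).items.foldl
        (fun (locs : PySem.Dict String Int) pc_c =>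
          locs.insert (g pc_c.1) (locs.getD (g pc_c.1) 0 + pc_c.2)) PySem.Dict.empty).keys
      = PySem.Set.ofList (xs.map g) := by
    rw [PySem.Dict.keys_foldl_insert_key ((PySem.Dict.counter xs).items)
          (fun pc_c => g pc_c.1) (fun locs pc_c => locs.getD (g pc_c.1) 0 + pc_c.2)
          PySem.Dict.empty]
    rw [PySem.Dict.keys_empty, PySem.Dict.items_counter, List.map_map, pvUpdateNil]
    show PySem.Set.ofList ((PySem.Set.ofList xs).map g) = _
    exact pvS1 g xs
  have hnodup := PySem.Dict.nodup_keys_foldl_insert_key ((PySem.Dict.counter xs).items)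
      (fun pc_c => g pc_c.1) (fun locs pc_c => locs.getD (g pc_c.1) 0 + pc_c.2)
      PySem.Dict.empty (by rw [PySem.Dict.keys_empty]; exact List.nodup_nil)
  rw [PySem.Dict.items_eq_map_keys _ hnodup 0, hkeys, PySem.Dict.items_counter (xs.map g)]
  apply List.map_congr_left
  intro k _
  rw [pvB_getD g, PySem.Dict.items_counter xs]
  rw [show ((PySem.Set.ofList xs).map (fun v => (v, (List.count v xs : Int)))).filter
        (fun p => g p.1 == k)
      = ((PySem.Set.ofList xs).filter (fun v => g v == k)).map
        (fun v => (v, (List.count v xs : Int))) from by rw [List.filter_map]; rfl]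
  rw [List.map_map]
  show (k, (0 : Int) + (((PySem.Set.ofList xs).filter (fun v => g v == k)).map
      (fun v => (List.count v xs : Int))).sum) = _
  rw [pvS2 (fun v => g v == k) xs, ← pvCountMap]
  simp

-- ===== VERDICT (by name: the statement is the Claim_ definition above) =====
theorem get_sample_locs_spec : Claim_equal_get_sample_locs := by
  intro samples symbols _ _
  unfold Spec_get_sample_locs
  rw [pvA_char]
  unfold get_sample_locs_alt
  rw [PySem.Dict.foldl_insert_getD_add_one_eq_counter]
  cases samples with
  | nil => rfl
  | cons x t =>
      have hx : x ∈ PySem.Set.ofList (x :: t) :=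
        (PySem.Set.mem_ofList ..).mpr (by simp)
      have hne : (PySem.Dict.counter (x :: t)).items ≠ [] := by
        rw [PySem.Dict.items_counter]
        intro h
        rw [List.map_eq_nil_iff.mp h] at hx
        simp at hx
      rw [if_neg hne]
      have hloc : ∀ pc : Int,
          (pvFindB pc ((List.zip symbols (PySem.List.slice symbols (some 1) none)).map
              (fun p => (p.1.1, p.2.1, p.1.2)))).getD
            (((PySem.List.pyGet? symbols (-1)).getD (0, "")).2)
            = pvKey symbols pc := by
        intro pc; rw [PySem.List.slice_from_one]; rfl
      simp only [hloc]
      exact (pvB_char (pvKey symbols) (x :: t)).symm
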